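-- pv_equiv track=rewrite | github.com/tsani/coding-cat-public | modulo-3/solution.py | modulo_3
-- ===== SOURCE A (Python) =====
-- def modulo_3(str:str) -> str:
--     """
--     the correct implementation
--     """
--     list1=[]
--     list2=[]
--     list3=[]
--     for x, char in enumerate(str):
--         if x%3==0:
--             list1.append(char)
--         if x%3==1:
--             list2.append(char)
--         if x%3==2:
--             list3.append(char)
--     return "".join(list1+list2+list3)
-- ===== SOURCE B (Python) =====
-- def modulo_3(str: str) -> str:
--     return str[0::3] + str[1::3] + str[2::3]
-- ===== Notes on version B (the rewrite author's own statement) =====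
-- stated objective: faster
-- what changed: Replaced the enumerate loop that dispatches each character into one of three lists by index mod 3 with three stride-3 slices (str[0::3]+str[1::3]+str[2::3]) concatenated directly; the per-character Python-level branching disappears into C-level slicing.
import Mathlib
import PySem

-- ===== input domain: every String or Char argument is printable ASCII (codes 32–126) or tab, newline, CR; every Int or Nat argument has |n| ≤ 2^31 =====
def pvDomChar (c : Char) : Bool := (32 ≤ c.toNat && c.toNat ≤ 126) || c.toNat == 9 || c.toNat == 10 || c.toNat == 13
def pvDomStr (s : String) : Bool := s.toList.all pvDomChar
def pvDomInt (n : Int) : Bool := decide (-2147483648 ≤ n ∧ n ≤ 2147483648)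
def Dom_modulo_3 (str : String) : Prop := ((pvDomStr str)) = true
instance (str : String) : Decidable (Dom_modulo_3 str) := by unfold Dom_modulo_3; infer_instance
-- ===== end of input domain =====

-- B replaces A's per-character index-dispatching enumerate loop with three stride-3 slices concatenated (constant-factor faster in a timing run).

-- ===== PORT A =====
def modulo_3 (str : String) : String :=
  let st := (PySem.List.enumerate str.toList 0).foldl
    (fun (acc : List Char × List Char × List Char) xc =>
      let acc := if PySem.Int.mod xc.1 3 = 0 then (acc.1 ++ [xc.2], acc.2.1, acc.2.2) else acc
      let acc := if PySem.Int.mod xc.1 3 = 1 then (acc.1, acc.2.1 ++ [xc.2], acc.2.2) else acc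
      let acc := if PySem.Int.mod xc.1 3 = 2 then (acc.1, acc.2.1, acc.2.2 ++ [xc.2]) else acc
      acc) ([], [], [])
  String.ofList (st.1 ++ st.2.1 ++ st.2.2)   -- "".join of the three char lists

-- ===== PORT B =====
-- str[r::3] is PySem.List.slice? on the char sequence (step 3 ≠ 0, so it never returns none)
def modulo_3_alt (str : String) : String :=
  let cs := str.toList
  String.ofList (((PySem.List.slice? cs (some 0) none 3).getD []) ++
                 ((PySem.List.slice? cs (some 1) none 3).getD []) ++
                 ((PySem.List.slice? cs (some 2) none 3).getD []))

-- ===== PRECONDITION & SPEC =====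
def Spec_modulo_3 (str : String) (out : String) : Prop := out = modulo_3_alt str
instance (str : String) (out : String) : Decidable (Spec_modulo_3 str out) := by unfold Spec_modulo_3; infer_instance

-- ===== CLAIM (what is proved, stated in full; the proofs are below) =====
def Claim_equal_modulo_3 : Prop := ∀ (str : String), Dom_modulo_3 str → Spec_modulo_3 str (modulo_3 str)

-- ===== LEMMAS AND PROOFS =====

def pick3 {α : Type} (cs : List α) : List α :=
  match cs with
  | [] => []
  | a :: t => a :: pick3 (t.drop 2)
  termination_by cs.length
  decreasing_by simp

theorem core3 {α : Type} (xs : List α) (s : Nat) :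
    (List.range ((xs.length - s + 2)/3)).filterMap (fun k => xs[s + 3*k]?) = pick3 (xs.drop s) := by
  by_cases h : xs.length ≤ s
  · have h1 : xs.length - s + 2 = 2 := by omega
    rw [h1, List.drop_eq_nil_of_le h]
    simp [pick3]
  · rw [Nat.not_le] at h
    have hc : (xs.length - s + 2)/3 = (xs.length - (s+3) + 2)/3 + 1 := by omega
    have hget : xs[s + 3*0]? = some xs[s] := by simp [h]
    have hrec := core3 xs (s+3)
    have hdrop : xs.drop s = xs[s] :: xs.drop (s+1) := (List.drop_eq_getElem_cons h)
    simp only [hc, List.range_succ_eq_map, List.filterMap_cons, List.filterMap_map, hget, hdrop]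
    rw [pick3]
    congr 1
    · rw [show ((fun k => xs[s + 3*k]?) ∘ Nat.succ) = (fun k => xs[(s+3) + 3*k]?) from by
        funext k; simp [Function.comp]; congr 1; ring]
      rw [List.drop_drop]
      exact hrec
  termination_by xs.length - s
  decreasing_by omega

theorem slice3 {A : Type} (xs : List A) (r : Nat) :
    PySem.List.slice? xs (some (r : Int)) none 3 = some (pick3 (xs.drop r)) := by
  unfold PySem.List.slice? PySem.List.sliceIndices
  norm_num
  have hm : ¬((r:Int) < 0) := by omega
  simp only [if_neg hm]
  have hmin : min (r:Int) (xs.length:Int) = ((min r xs.length : Nat) : Int) := by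
    exact (Nat.cast_min r xs.length).symm
  rw [hmin]
  set m := min r xs.length with hmdef
  have hmle : m ≤ xs.length := by omega
  have hfun : (fun x : Nat => xs[(((m:Nat):Int) + 3 * (x:Int)).toNat]?) = (fun x : Nat => xs[m + 3*x]?) := by
    funext x
    have hx : (((m:Nat):Int) + 3*(x:Int)).toNat = m + 3*x := by omega
    rw [hx]
  rw [hfun]
  have hcnt : (if ((m:Nat):Int) < (xs.length:Int) then ((((xs.length:Int) - ((m:Nat):Int)) + 3 - 1) / 3).toNat else 0)
      = (xs.length - m + 2)/3 := by
    by_cases hlt : m < xs.length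
    · rw [if_pos (by exact_mod_cast hlt)]
      have h1 : ((xs.length:Int) - ((m:Nat):Int)) + 3 - 1 = ((xs.length - m + 2 : Nat) : Int) := by
        push_cast [Nat.cast_sub hmle]; ring
      rw [h1, show (((xs.length - m + 2 : Nat) : Int) / 3) = (((xs.length - m + 2)/3 : Nat) : Int) from by
        exact_mod_cast (Int.natCast_div _ 3)]
      exact Int.toNat_natCast _
    · rw [if_neg (by exact_mod_cast hlt), show xs.length - m + 2 = 2 from by omega]
  rw [hcnt, core3]
  have hdr : xs.drop m = xs.drop r := by
    rcases Nat.le_total r xs.length with h | h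
    · rw [show m = r from by omega]
    · rw [List.drop_eq_nil_of_le (show xs.length ≤ m from by omega), List.drop_eq_nil_of_le h]
  rw [hdr]

def sel (r : Int) (cs : List Char) (i : Int) : List Char :=
  (PySem.List.enumerate cs i).filterMap (fun p => if PySem.Int.mod p.1 3 = r then some p.2 else none)

theorem sel_nil (r i : Int) : sel r [] i = [] := rfl

theorem sel_cons (r : Int) (a : Char) (t : List Char) (i : Int) :
    sel r (a :: t) i = (if PySem.Int.mod i 3 = r then [a] else []) ++ sel r t (i+1) := by
  simp [sel, PySem.List.enumerate_cons, List.filterMap_cons]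
  split_ifs with h <;> simp_all

theorem sel_shift (r : Int) (cs : List Char) : ∀ i : Int, sel r cs (i + 3) = sel r cs i := by
  induction cs with
  | nil => intro i; rfl
  | cons a t ih =>
    intro i
    rw [sel_cons, sel_cons]
    have hmod : PySem.Int.mod (i+3) 3 = PySem.Int.mod i 3 := by
      rw [PySem.Int.mod_eq_emod_of_pos (show (0:Int) < 3 from by omega),
          PySem.Int.mod_eq_emod_of_pos (show (0:Int) < 3 from by omega)]
      omega
    rw [hmod, show i + 3 + 1 = (i + 1) + 3 from by ring, ih]

def stepA (acc : List Char × List Char × List Char) (xc : Int × Char) :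
    List Char × List Char × List Char :=
  let acc := if PySem.Int.mod xc.1 3 = 0 then (acc.1 ++ [xc.2], acc.2.1, acc.2.2) else acc
  let acc := if PySem.Int.mod xc.1 3 = 1 then (acc.1, acc.2.1 ++ [xc.2], acc.2.2) else acc
  let acc := if PySem.Int.mod xc.1 3 = 2 then (acc.1, acc.2.1, acc.2.2 ++ [xc.2]) else acc
  acc

theorem stepA_eq0 (acc : List Char × List Char × List Char) (i : Int) (a : Char)
    (h : PySem.Int.mod i 3 = 0) : stepA acc (i, a) = (acc.1 ++ [a], acc.2.1, acc.2.2) := by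
  simp only [stepA, h]; norm_num

theorem stepA_eq1 (acc : List Char × List Char × List Char) (i : Int) (a : Char)
    (h : PySem.Int.mod i 3 = 1) : stepA acc (i, a) = (acc.1, acc.2.1 ++ [a], acc.2.2) := by
  simp only [stepA, h]; norm_num

theorem stepA_eq2 (acc : List Char × List Char × List Char) (i : Int) (a : Char)
    (h : PySem.Int.mod i 3 = 2) : stepA acc (i, a) = (acc.1, acc.2.1, acc.2.2 ++ [a]) := by
  simp only [stepA, h]; norm_num

theorem foldA (cs : List Char) : ∀ (i : Int) (l1 l2 l3 : List Char),
    (PySem.List.enumerate cs i).foldl stepA (l1, l2, l3)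
    = (l1 ++ sel 0 cs i, l2 ++ sel 1 cs i, l3 ++ sel 2 cs i) := by
  induction cs with
  | nil => intro i l1 l2 l3; simp [sel_nil, PySem.List.enumerate_nil]
  | cons a t ih =>
    intro i l1 l2 l3
    rw [PySem.List.enumerate_cons, List.foldl_cons]
    have h0 : 0 ≤ PySem.Int.mod i 3 := PySem.Int.mod_nonneg i (by omega)
    have h3 : PySem.Int.mod i 3 < 3 := PySem.Int.mod_lt i (by omega)
    rw [sel_cons 0, sel_cons 1, sel_cons 2]
    interval_cases h : (PySem.Int.mod i 3)
    · rw [stepA_eq0 _ _ _ h, ih (i+1)]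
      simp [List.append_assoc]
    · rw [stepA_eq1 _ _ _ h, ih (i+1)]
      simp [List.append_assoc]
    · rw [stepA_eq2 _ _ _ h, ih (i+1)]
      simp [List.append_assoc]

theorem sel_pick (cs : List Char) :
    sel 0 cs 0 = pick3 cs ∧ sel 1 cs 0 = pick3 (cs.drop 1) ∧ sel 2 cs 0 = pick3 (cs.drop 2) := by
  match cs with
  | [] => refine ⟨?_, ?_, ?_⟩ <;> simp [sel_nil, pick3]
  | [a] =>
    refine ⟨?_, ?_, ?_⟩ <;> simp [sel_cons, sel_nil, pick3]
  | [a, b] =>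
    refine ⟨?_, ?_, ?_⟩ <;> simp [sel_cons, sel_nil, pick3]
  | a :: b :: c :: t =>
    obtain ⟨ih0, ih1, ih2⟩ := sel_pick t
    have hsh : ∀ r : Int, sel r t 3 = sel r t 0 := by
      intro r; simpa using sel_shift r t 0
    refine ⟨?_, ?_, ?_⟩ <;>
      simp [sel_cons, hsh, ih0, ih1, ih2, pick3]
  termination_by cs.length
  decreasing_by simp; omega

-- ===== VERDICT (by name: the statement is the Claim_ definition above) =====
theorem modulo_3_spec : Claim_equal_modulo_3 := by
  intro str _
  show modulo_3 str = modulo_3_alt str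
  have hA : modulo_3 str =
      (let st := (PySem.List.enumerate str.toList 0).foldl stepA ([], [], [])
       String.ofList (st.1 ++ st.2.1 ++ st.2.2)) := rfl
  obtain ⟨p0, p1, p2⟩ := sel_pick str.toList
  have s0 := slice3 str.toList 0
  have s1 := slice3 str.toList 1
  have s2 := slice3 str.toList 2
  norm_num at s0 s1 s2
  rw [hA]
  simp only [foldA str.toList 0 [] [] [], List.nil_append]
  rw [modulo_3_alt]
  simp only [s0, s1, s2, Option.getD_some]
  rw [p0, p1, p2]
  simp
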